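-- pv_equiv track=rewrite | github.com/snail32706/NYCU | plt_all.py | data_split_and_fit
-- ===== SOURCE A (Python) =====
-- def data_split_and_fit(x_dat, y_dat, xpeaks, N):
--     '''
--     D_1, D_2 分別裝切割後的 diff error func region of data.
--     N : avg of N number data.
--     '''
--     D_1, D_2 = [], []
--     if len(xpeaks) == 1:
--         D_1 = x_dat
--         D_2 = y_dat
--     else:
--         for i, xval in enumerate(xpeaks):
--             if i == 0:
--                 peak_mid = int( (xpeaks[i]+xpeaks[i+1])/2 )
--                 x = x_dat[0:peak_mid*N]
--                 y = y_dat[0:peak_mid*N]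
--                 D_1.append(x)
--                 D_2.append(y)
--             elif i != len(xpeaks)-1:
--                 peak_mid1 = int( (xpeaks[i-1]+xpeaks[i])/2 )
--                 peak_mid2 = int( (xpeaks[i]+xpeaks[i+1])/2 )
--                 x = x_dat[peak_mid1*N:peak_mid2*N]
--                 y = y_dat[peak_mid1*N:peak_mid2*N]
--                 D_1.append(x)
--                 D_2.append(y)
--             elif i == len(xpeaks)-1:
--                 peak_mid = int( (xpeaks[i-1]+xpeaks[i])/2 )
--                 x = x_dat[peak_mid*N:]
--                 y = y_dat[peak_mid*N:]
--                 D_1.append(x)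
--                 D_2.append(y)
--     return D_1, D_2
-- ===== SOURCE B (Python) =====
-- def data_split_and_fit(x_dat, y_dat, xpeaks, N):
--     '''Boundary-table re-implementation: compute all region boundaries first,
--     then cut both arrays with one uniform slicing pass.'''
--     if not xpeaks:
--         return [], []
--     mids = [int((xpeaks[i] + xpeaks[i + 1]) / 2) * N for i in range(len(xpeaks) - 1)]
--     xb = [0] + mids + [len(x_dat)]
--     yb = [0] + mids + [len(y_dat)]
--     D_1 = [x_dat[lo:hi] for lo, hi in zip(xb, xb[1:])]
--     D_2 = [y_dat[lo:hi] for lo, hi in zip(yb, yb[1:])]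
--     return D_1, D_2
-- ===== Notes on version B (the rewrite author's own statement) =====
-- stated objective: simpler
-- what changed: Replaces the three positional special-case branches inside the loop by a precomputed boundary table ([0]+mids+[len]) followed by one uniform slicing pass over consecutive boundary pairs; Pre_ excludes single-peak xpeaks, where A returns the bare arrays x_dat, y_dat (not a list of regions, off the declared list-of-lists type) while B returns the single whole region [x_dat], [y_dat].
-- outside the precondition, e.g. on data_split_and_fit([1, 2], [3, 4], [5], 7): A returns ([1, 2], [3, 4]), B returns ([[1, 2]], [[3, 4]])
import Mathlib
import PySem

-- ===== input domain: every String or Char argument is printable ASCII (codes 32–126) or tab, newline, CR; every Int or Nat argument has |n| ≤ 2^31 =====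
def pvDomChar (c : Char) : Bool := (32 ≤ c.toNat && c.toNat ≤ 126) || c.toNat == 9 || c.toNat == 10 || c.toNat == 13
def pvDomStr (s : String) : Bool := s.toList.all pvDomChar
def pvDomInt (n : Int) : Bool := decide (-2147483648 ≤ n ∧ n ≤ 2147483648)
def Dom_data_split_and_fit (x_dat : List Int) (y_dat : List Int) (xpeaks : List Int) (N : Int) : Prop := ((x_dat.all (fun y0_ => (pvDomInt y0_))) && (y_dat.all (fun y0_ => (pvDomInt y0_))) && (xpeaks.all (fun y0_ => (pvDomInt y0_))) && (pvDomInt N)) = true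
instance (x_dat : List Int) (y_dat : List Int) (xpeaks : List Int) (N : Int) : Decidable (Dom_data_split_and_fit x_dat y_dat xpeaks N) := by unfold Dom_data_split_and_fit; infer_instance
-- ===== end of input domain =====

-- B replaces A's three positional special-case branches by a boundary table [0]+mids+[len] and one
-- uniform slicing pass (objective: simpler). Pre_ excludes len(xpeaks)==1, where A returns the bare
-- arrays x_dat, y_dat — not a value of the declared list-of-lists type.

-- ===== PORT A =====
-- loop body of A's 'for i, xval in enumerate(xpeaks)' (the indices xpeaks[i±1] are always in
-- range on the inputs the loop reaches, so pyGetD's default is never used; int((a+b)/2) is exact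
-- trunc division for |a|,|b| ≤ 2^31 — PySem.Int.truncdiv)
def aStep (x_dat y_dat xpeaks : List Int) (N : Int)
    (acc : List (List Int) × List (List Int)) (p : Int × Int) :
    List (List Int) × List (List Int) :=
  let i := p.1
  if i = 0 then
    let peak_mid := PySem.Int.truncdiv (PySem.List.pyGetD xpeaks i 0 + PySem.List.pyGetD xpeaks (i + 1) 0) 2
    (acc.1 ++ [PySem.List.slice x_dat (some 0) (some (peak_mid * N))],
     acc.2 ++ [PySem.List.slice y_dat (some 0) (some (peak_mid * N))])
  else if i ≠ (xpeaks.length : Int) - 1 then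
    let peak_mid1 := PySem.Int.truncdiv (PySem.List.pyGetD xpeaks (i - 1) 0 + PySem.List.pyGetD xpeaks i 0) 2
    let peak_mid2 := PySem.Int.truncdiv (PySem.List.pyGetD xpeaks i 0 + PySem.List.pyGetD xpeaks (i + 1) 0) 2
    (acc.1 ++ [PySem.List.slice x_dat (some (peak_mid1 * N)) (some (peak_mid2 * N))],
     acc.2 ++ [PySem.List.slice y_dat (some (peak_mid1 * N)) (some (peak_mid2 * N))])
  else
    let peak_mid := PySem.Int.truncdiv (PySem.List.pyGetD xpeaks (i - 1) 0 + PySem.List.pyGetD xpeaks i 0) 2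
    (acc.1 ++ [PySem.List.slice x_dat (some (peak_mid * N)) none],
     acc.2 ++ [PySem.List.slice y_dat (some (peak_mid * N)) none])

def data_split_and_fit (x_dat : List Int) (y_dat : List Int) (xpeaks : List Int) (N : Int) : List (List Int) × List (List Int) :=
  if xpeaks.length = 1 then
    -- Python returns the BARE arrays x_dat, y_dat here (list[int], not list[list[int]]):
    -- untypeable under the convention; these inputs are excluded by Pre_.
    ([x_dat], [y_dat])
  else
    (PySem.List.enumerate xpeaks).foldl (aStep x_dat y_dat xpeaks N) ([], [])

-- ===== PORT B =====
-- mids = [int((xpeaks[i]+xpeaks[i+1])/2)*N for i in range(len(xpeaks)-1)]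
def altMids (xpeaks : List Int) (N : Int) : List Int :=
  (List.range (xpeaks.length - 1)).map (fun (i : Nat) =>
    PySem.Int.truncdiv (PySem.List.pyGetD xpeaks (i : Int) 0 + PySem.List.pyGetD xpeaks ((i : Int) + 1) 0) 2 * N)

def data_split_and_fit_alt (x_dat : List Int) (y_dat : List Int) (xpeaks : List Int) (N : Int) : List (List Int) × List (List Int) :=
  if xpeaks = [] then ([], [])
  else
    let mids := altMids xpeaks N
    let xb : List Int := 0 :: mids ++ [(x_dat.length : Int)]
    let yb : List Int := 0 :: mids ++ [(y_dat.length : Int)]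
    ((xb.zip xb.tail).map (fun p => PySem.List.slice x_dat (some p.1) (some p.2)),
     (yb.zip yb.tail).map (fun p => PySem.List.slice y_dat (some p.1) (some p.2)))

-- ===== PRECONDITION & SPEC =====
-- Pre_ excludes exactly len(xpeaks)==1: there A returns the bare arrays x_dat, y_dat, which is not
-- a value of the declared list-of-lists return type (B returns the single whole region [x_dat],[y_dat]).
def Pre_data_split_and_fit (x_dat : List Int) (y_dat : List Int) (xpeaks : List Int) (N : Int) : Prop :=
  xpeaks.length ≠ 1
instance (x_dat : List Int) (y_dat : List Int) (xpeaks : List Int) (N : Int) : Decidable (Pre_data_split_and_fit x_dat y_dat xpeaks N) := by unfold Pre_data_split_and_fit; infer_instance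
def pvWitness_data_split_and_fit : List Int × List Int × List Int × Int := ([1, 2, 3, 4], [5, 6, 7, 8], [1, 3], 1)

def Spec_data_split_and_fit (x_dat : List Int) (y_dat : List Int) (xpeaks : List Int) (N : Int) (out : List (List Int) × List (List Int)) : Prop := out = data_split_and_fit_alt x_dat y_dat xpeaks N
instance (x_dat : List Int) (y_dat : List Int) (xpeaks : List Int) (N : Int) (out : List (List Int) × List (List Int)) : Decidable (Spec_data_split_and_fit x_dat y_dat xpeaks N out) := by unfold Spec_data_split_and_fit; infer_instance

-- ===== CLAIM (what is proved, stated in full; the proofs are below) =====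
def Claim_equal_data_split_and_fit : Prop := ∀ (x_dat : List Int) (y_dat : List Int) (xpeaks : List Int) (N : Int), Dom_data_split_and_fit x_dat y_dat xpeaks N → Pre_data_split_and_fit x_dat y_dat xpeaks N → Spec_data_split_and_fit x_dat y_dat xpeaks N (data_split_and_fit x_dat y_dat xpeaks N)

-- ===== LEMMAS AND PROOFS =====

-- the element A's loop appends for index i (both components slice with the same bounds)
def regionA (dat xpeaks : List Int) (N : Int) (i : Int) : List Int :=
  if i = 0 then
    PySem.List.slice dat (some 0)
      (some (PySem.Int.truncdiv (PySem.List.pyGetD xpeaks i 0 + PySem.List.pyGetD xpeaks (i + 1) 0) 2 * N))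
  else if i ≠ (xpeaks.length : Int) - 1 then
    PySem.List.slice dat
      (some (PySem.Int.truncdiv (PySem.List.pyGetD xpeaks (i - 1) 0 + PySem.List.pyGetD xpeaks i 0) 2 * N))
      (some (PySem.Int.truncdiv (PySem.List.pyGetD xpeaks i 0 + PySem.List.pyGetD xpeaks (i + 1) 0) 2 * N))
  else
    PySem.List.slice dat
      (some (PySem.Int.truncdiv (PySem.List.pyGetD xpeaks (i - 1) 0 + PySem.List.pyGetD xpeaks i 0) 2 * N))
      none

theorem aStep_eq (x_dat y_dat xpeaks : List Int) (N : Int)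
    (acc : List (List Int) × List (List Int)) (p : Int × Int) :
    aStep x_dat y_dat xpeaks N acc p =
      (acc.1 ++ [regionA x_dat xpeaks N p.1], acc.2 ++ [regionA y_dat xpeaks N p.1]) := by
  unfold aStep regionA
  dsimp only
  split_ifs <;> rfl

theorem foldl_aStep (x_dat y_dat xpeaks : List Int) (N : Int)
    (l : List (Int × Int)) (acc : List (List Int) × List (List Int)) :
    l.foldl (aStep x_dat y_dat xpeaks N) acc =
      (acc.1 ++ l.map (fun p => regionA x_dat xpeaks N p.1),
       acc.2 ++ l.map (fun p => regionA y_dat xpeaks N p.1)) := by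
  induction l generalizing acc with
  | nil => simp
  | cons p t ih => rw [List.foldl_cons, aStep_eq, ih]; simp

theorem zip_tail_eq (l : List Int) :
    l.zip l.tail = (List.range (l.length - 1)).map (fun i => (l.getD i 0, l.getD (i + 1) 0)) := by
  induction l with
  | nil => simp
  | cons a t ih =>
    cases t with
    | nil => simp
    | cons b t2 =>
      show (a, b) :: (b :: t2).zip (b :: t2).tail = _
      rw [ih]
      simp only [List.length_cons, Nat.add_sub_cancel, List.range_succ_eq_map, List.map_cons,
        List.map_map]
      rfl

theorem slice_len {α : Type} (xs : List α) (a : Int) :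
    PySem.List.slice xs (some a) (some (xs.length : Int)) = PySem.List.slice xs (some a) none := by
  simp [PySem.List.slice]

-- boundary j of B's table, for 1 ≤ j ≤ n-1, is the j-th midpoint
theorem mids_getD (xpeaks : List Int) (N : Int) (n j : Nat) (hlen : xpeaks.length = n)
    (hj : j < n - 1) :
    (altMids xpeaks N).getD j 0 =
      PySem.Int.truncdiv (PySem.List.pyGetD xpeaks (j : Int) 0 + PySem.List.pyGetD xpeaks ((j : Int) + 1) 0) 2 * N := by
  unfold altMids
  rw [hlen, PySem.List.getD_map_range _ _ _ _ hj]

theorem region_eq (dat xpeaks : List Int) (N : Int) (n k : Nat)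
    (hlen : xpeaks.length = n) (hn : 2 ≤ n) (hk : k < n) :
    PySem.List.slice dat
      (some ((0 :: altMids xpeaks N ++ [(dat.length : Int)]).getD k 0))
      (some ((0 :: altMids xpeaks N ++ [(dat.length : Int)]).getD (k + 1) 0))
      = regionA dat xpeaks N (k : Int) := by
  have hm : (altMids xpeaks N).length = n - 1 := by simp [altMids, hlen]
  have hb0 : (0 :: altMids xpeaks N ++ [(dat.length : Int)]).getD 0 0 = 0 := rfl
  have hb_mid : ∀ j : Nat, 1 ≤ j → j ≤ n - 1 →
      (0 :: altMids xpeaks N ++ [(dat.length : Int)]).getD j 0 =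
        PySem.Int.truncdiv (PySem.List.pyGetD xpeaks ((j : Int) - 1) 0 + PySem.List.pyGetD xpeaks (j : Int) 0) 2 * N := by
    intro j h1 h2
    obtain ⟨j', rfl⟩ : ∃ j', j = j' + 1 := ⟨j - 1, by omega⟩
    have hj' : j' < n - 1 := by omega
    show ((altMids xpeaks N ++ [(dat.length : Int)]).getD j' 0) = _
    rw [List.getD_append _ _ _ _ (by omega), mids_getD xpeaks N n j' hlen hj']
    push_cast
    ring_nf
  have hb_last : (0 :: altMids xpeaks N ++ [(dat.length : Int)]).getD n 0 = (dat.length : Int) := by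
    obtain ⟨m, rfl⟩ : ∃ m, n = m + 1 := ⟨n - 1, by omega⟩
    show ((altMids xpeaks N ++ [(dat.length : Int)]).getD m 0) = _
    rw [List.getD_append_right _ _ _ _ (by omega)]
    simp [hm]
  unfold regionA
  rcases Nat.eq_zero_or_pos k with hk0 | hk1
  · subst hk0
    rw [if_pos (by norm_num)]
    rw [hb0, hb_mid 1 le_rfl (by omega)]
    norm_num
  · rw [if_neg (by omega)]
    rcases Nat.lt_or_ge k (n - 1) with hklt | hkge
    · rw [if_pos (by rw [hlen]; omega)]
      rw [hb_mid k hk1 (by omega), hb_mid (k + 1) (by omega) (by omega)]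
      push_cast
      ring_nf
    · have hkeq : k = n - 1 := by omega
      rw [if_neg (by rw [hlen]; omega)]
      rw [hb_mid k hk1 (by omega)]
      have : k + 1 = n := by omega
      rw [this, hb_last, slice_len]

theorem data_split_and_fit_spec : Claim_equal_data_split_and_fit := by
  intro x_dat y_dat xpeaks N _ hpre
  unfold Spec_data_split_and_fit data_split_and_fit data_split_and_fit_alt
  by_cases hnil : xpeaks = []
  · subst hnil; simp [PySem.List.enumerate]
  · have hn : 2 ≤ xpeaks.length := by
      have h0 : xpeaks.length ≠ 0 := by simpa [List.length_eq_zero_iff] using hnil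
      have h1 : xpeaks.length ≠ 1 := hpre
      omega
    rw [if_neg (by omega), if_neg hnil]
    rw [foldl_aStep]
    have hmapfst : ∀ f : Int → List Int,
        (PySem.List.enumerate xpeaks).map (fun p => f p.1) =
          (List.range xpeaks.length).map (fun (k : Nat) => f (k : Int)) := by
      intro f
      rw [show (PySem.List.enumerate xpeaks).map (fun p => f p.1) =
            ((PySem.List.enumerate xpeaks).map (·.1)).map f from by rw [List.map_map]; rfl]
      rw [PySem.List.map_fst_enumerate, PySem.List.pyRange_one, List.map_map]
      simp
    rw [hmapfst, hmapfst]
    have hzip : ∀ (dat : List Int),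
        ((0 :: altMids xpeaks N ++ [(dat.length : Int)]).zip
            (0 :: altMids xpeaks N ++ [(dat.length : Int)]).tail).map
          (fun p => PySem.List.slice dat (some p.1) (some p.2)) =
          (List.range xpeaks.length).map (fun (k : Nat) => regionA dat xpeaks N (k : Int)) := by
      intro dat
      rw [zip_tail_eq, List.map_map]
      have hlen' : (0 :: altMids xpeaks N ++ [(dat.length : Int)]).length - 1 = xpeaks.length := by
        simp [altMids]; omega
      rw [hlen']
      refine List.map_congr_left ?_
      intro k hkmem
      simp only [Function.comp]
      exact region_eq dat xpeaks N xpeaks.length k rfl hn (List.mem_range.mp hkmem)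
    simp only [List.nil_append]
    exact Prod.ext (hzip x_dat).symm (hzip y_dat).symm
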